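-- pv_equiv track=rewrite | github.com/Thomas-mcinally/advent-of-code-2023 | day13/main.py | score_from_chunk
-- ===== SOURCE A (Python) =====
-- def smudges_required_for_valid_palindrome_centered_at(s, l,r):
--     smudges = 0
--     while l >= 0 and r < len(s):
--         if s[l] != s[r]:
--             smudges += 1
--         l-=1
--         r+=1
--     return smudges
--
-- def score_from_chunk(chunk, score_multiplier):
--     ROWS = len(chunk)
--     COLS = len(chunk[0])
--
--     score = 0
--     for c in range(COLS-1):
--
--         for r in range(ROWS):
--             if smudges_required_for_valid_palindrome_centered_at(chunk[r], c, c+1) != 0: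
--                 break
--         else:
--             score += (c+1) * score_multiplier
--     return score
-- ===== SOURCE B (Python) =====
-- def score_from_chunk(chunk, score_multiplier):
--     cols = len(chunk[0])
--     valid = list(range(cols - 1))
--     for row in chunk:
--         valid = [c for c in valid if _mirror_at(row, c)]
--     return sum(c + 1 for c in valid) * score_multiplier
--
--
-- def _mirror_at(row, c):
--     # boundary between columns c and c+1 is a mirror for this row iff the
--     # shorter side, reversed, equals the facing prefix/suffix of the other side
--     left = row[:c + 1]
--     right = row[c + 1:]
--     m = min(len(left), len(right))
--     return left[len(left) - m:][::-1] == right[:m]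
-- ===== Notes on version B (the rewrite author's own statement) =====
-- stated objective: alternative
-- what changed: Row-major instead of column-major: each row filters a surviving list of candidate mirror boundaries (checked by a slice-reverse comparison instead of A's char-by-char expanding while loop), then the score is the sum over survivors; A's per-column inner loop with break/else disappears.
import Mathlib
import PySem

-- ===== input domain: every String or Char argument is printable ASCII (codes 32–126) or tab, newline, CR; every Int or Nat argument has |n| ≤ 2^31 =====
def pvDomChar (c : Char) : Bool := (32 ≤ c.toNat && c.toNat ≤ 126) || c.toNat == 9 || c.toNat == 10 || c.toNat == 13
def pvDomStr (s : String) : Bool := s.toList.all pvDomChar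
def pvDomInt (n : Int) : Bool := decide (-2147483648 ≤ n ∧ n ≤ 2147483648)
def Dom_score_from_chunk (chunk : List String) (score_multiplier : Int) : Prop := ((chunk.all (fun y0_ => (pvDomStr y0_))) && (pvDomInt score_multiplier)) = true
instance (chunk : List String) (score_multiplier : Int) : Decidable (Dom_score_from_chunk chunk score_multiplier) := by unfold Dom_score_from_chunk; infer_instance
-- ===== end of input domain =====

-- B is a row-major reformulation of A: each row filters the surviving mirror boundaries
-- (checked via a slice-reverse comparison) instead of A's per-column loop over rows with break/else.

-- ===== PORT A =====
-- while l >= 0 and r < len(s): count mismatches; indices are in range whenever read (the guard), so getD never defaults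
def smudges_at (s : List Char) (l r : Int) : Int :=
  if h : 0 ≤ l ∧ r < (s.length : Int) then
    (if s.getD l.toNat ' ' ≠ s.getD r.toNat ' ' then 1 else 0) + smudges_at s (l - 1) (r + 1)
  else 0
termination_by ((s.length : Int) - r).toNat
decreasing_by omega

-- 'for r in range(ROWS): … break / else': scan rows in order, fail on the first row with smudges ≠ 0
def rowsOk (rows : List String) (c : Nat) : Bool :=
  match rows with
  | [] => true
  | s :: rest => if smudges_at s.toList (c : Int) ((c : Int) + 1) ≠ 0 then false else rowsOk rest c

def score_from_chunk (chunk : List String) (score_multiplier : Int) : Int :=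
  -- chunk[0] raises IndexError on an empty chunk: excluded by Pre_ (headD is unreachable there)
  let COLS := (chunk.headD "").toList.length
  (List.range (COLS - 1)).foldl
    (fun score c => if rowsOk chunk c then score + ((c : Int) + 1) * score_multiplier else score) 0

-- ===== PORT B =====
-- left[len(left)-m:][::-1] == right[:m]  with left = row[:c+1], right = row[c+1:]
def mirror_at (row : List Char) (c : Nat) : Bool :=
  let left := row.take (c + 1)
  let right := row.drop (c + 1)
  let m := min left.length right.length
  (left.drop (left.length - m)).reverse == right.take m

def score_from_chunk_alt (chunk : List String) (score_multiplier : Int) : Int :=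
  let cols := (chunk.headD "").toList.length
  let valid := chunk.foldl (fun valid row => valid.filter (fun c => mirror_at row.toList c))
                 (List.range (cols - 1))
  (valid.foldl (fun (a : Int) (c : Nat) => a + ((c : Int) + 1)) 0) * score_multiplier

-- ===== PRECONDITION & SPEC =====
-- Pre_ excludes only the empty chunk, on which A (and B) raises IndexError at chunk[0]
def Pre_score_from_chunk (chunk : List String) (score_multiplier : Int) : Prop := chunk ≠ []
instance (chunk : List String) (score_multiplier : Int) : Decidable (Pre_score_from_chunk chunk score_multiplier) := by unfold Pre_score_from_chunk; infer_instance

def pvWitness_score_from_chunk : List String × Int := (["##.", "##."], 1)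

def Spec_score_from_chunk (chunk : List String) (score_multiplier : Int) (out : Int) : Prop := out = score_from_chunk_alt chunk score_multiplier
instance (chunk : List String) (score_multiplier : Int) (out : Int) : Decidable (Spec_score_from_chunk chunk score_multiplier out) := by unfold Spec_score_from_chunk; infer_instance

-- ===== CLAIM (what is proved, stated in full; the proofs are below) =====
def Claim_equal_score_from_chunk : Prop := ∀ (chunk : List String) (score_multiplier : Int), Dom_score_from_chunk chunk score_multiplier → Pre_score_from_chunk chunk score_multiplier → Spec_score_from_chunk chunk score_multiplier (score_from_chunk chunk score_multiplier)

-- ===== LEMMAS AND PROOFS =====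

theorem smudges_at_nonneg (s : List Char) (l r : Int) : 0 ≤ smudges_at s l r := by
  fun_induction smudges_at s l r with
  | case1 l r h ih => split <;> omega
  | case2 l r h => simp

-- characterisation of the while loop: no smudge iff every in-range expanding pair matches
theorem smudges_at_eq_zero_iff (s : List Char) (l r : Int) :
    smudges_at s l r = 0 ↔
      ∀ k : Nat, 0 ≤ l - k → r + k < (s.length : Int) →
        s.getD (l - k).toNat ' ' = s.getD (r + k).toNat ' ' := by
  fun_induction smudges_at s l r with
  | case1 l r h ih =>
    have hn := smudges_at_nonneg s (l - 1) (r + 1)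
    constructor
    · intro hz k hk1 hk2
      have h12 : s.getD l.toNat ' ' = s.getD r.toNat ' ' ∧
          smudges_at s (l - 1) (r + 1) = 0 := by
        by_cases hc : s.getD l.toNat ' ' = s.getD r.toNat ' '
        · rw [if_neg (not_not_intro hc)] at hz
          exact ⟨hc, by omega⟩
        · rw [if_pos hc] at hz
          exact False.elim (by omega)
      obtain ⟨h1, h2⟩ := h12
      rcases Nat.eq_zero_or_pos k with rfl | hk
      · simpa using h1
      · obtain ⟨k', rfl⟩ : ∃ k', k = k' + 1 := ⟨k - 1, by omega⟩
        have := (ih.mp h2) k' (by omega) (by omega)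
        have e1 : l - 1 - (k' : Int) = l - ((k' + 1 : Nat) : Int) := by push_cast; ring
        have e2 : r + 1 + (k' : Int) = r + ((k' + 1 : Nat) : Int) := by push_cast; ring
        rwa [e1, e2] at this
    · intro hall
      have h0 := hall 0 (by omega) (by omega)
      simp only [Nat.cast_zero, Int.sub_zero, Int.add_zero] at h0
      have h2 : smudges_at s (l - 1) (r + 1) = 0 := by
        apply ih.mpr
        intro k hk1 hk2
        have := hall (k + 1) (by push_cast; omega)
          (by push_cast; omega)
        have e1 : l - 1 - (k : Int) = l - ((k + 1 : Nat) : Int) := by push_cast; ring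
        have e2 : r + 1 + (k : Int) = r + ((k + 1 : Nat) : Int) := by push_cast; ring
        rw [e1, e2]; exact this
      rw [h2, if_neg (not_not_intro (by simpa using h0))]
      norm_num
  | case2 l r h =>
    constructor
    · intro _ k hk1 hk2
      exfalso
      rcases Nat.eq_zero_or_pos k with rfl | hk
      · simp at hk1 hk2; omega
      · omega
    · intro _; rfl

-- the slice-reverse test of B says exactly the same thing
theorem mirror_at_iff (row : List Char) (c : Nat) :
    mirror_at row c = true ↔
      ∀ k : Nat, 0 ≤ (c : Int) - k → (c : Int) + 1 + k < (row.length : Int) →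
        row.getD ((c : Int) - k).toNat ' ' = row.getD ((c : Int) + 1 + k).toNat ' ' := by
  unfold mirror_at
  simp only [beq_iff_eq]
  set m := min (row.take (c+1)).length (row.drop (c+1)).length with hm
  have hmlen : m = min (min (c+1) row.length) (row.length - (c+1)) := by
    rw [hm]; simp
  have hL1 : ∀ i, i < m →
      ((row.take (c+1)).drop ((row.take (c+1)).length - m)).reverse[i]? = row[c-i]? := by
    intro i hi
    rw [List.getElem?_reverse (by simp only [List.length_drop, List.length_take]; omega)]
    simp only [List.length_drop, List.length_take, List.getElem?_drop, List.getElem?_take]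
    rw [if_pos (by omega)]
    congr 1
    omega
  have hL2 : ∀ i, i < m → ((row.drop (c+1)).take m)[i]? = row[c+1+i]? := by
    intro i hi
    rw [List.getElem?_take_of_lt hi, List.getElem?_drop]
  constructor
  · intro heq k hk1 hk2
    have hk : k < m := by omega
    have := congrArg (fun L => L[k]?) heq
    simp only at this
    rw [hL1 k hk, hL2 k hk] at this
    have e1 : ((c : Int) - k).toNat = c - k := by omega
    have e2 : ((c : Int) + 1 + k).toNat = c + 1 + k := by omega
    rw [e1, e2, List.getD_eq_getElem?_getD, List.getD_eq_getElem?_getD, this]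
  · intro hall
    apply List.ext_getElem?
    intro i
    by_cases hi : i < m
    · rw [hL1 i hi, hL2 i hi]
      have := hall i (by omega) (by omega)
      have e1 : ((c : Int) - i).toNat = c - i := by omega
      have e2 : ((c : Int) + 1 + i).toNat = c + 1 + i := by omega
      rw [e1, e2, List.getD_eq_getElem?_getD, List.getD_eq_getElem?_getD,
          List.getElem?_eq_getElem (by omega : c - i < row.length),
          List.getElem?_eq_getElem (by omega : c + 1 + i < row.length)] at this
      rw [List.getElem?_eq_getElem (by omega : c - i < row.length),
          List.getElem?_eq_getElem (by omega : c + 1 + i < row.length)]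
      simpa using this
    · have hb1 : ((row.take (c+1)).drop ((row.take (c+1)).length - m)).reverse.length ≤ i := by
        simp only [List.length_reverse, List.length_drop, List.length_take]
        omega
      have hb2 : ((row.drop (c+1)).take m).length ≤ i := by
        simp only [List.length_take, List.length_drop]
        omega
      rw [List.getElem?_eq_none hb1, List.getElem?_eq_none hb2]

-- bridge: A's zero-smudge test for a row = B's mirror test
theorem smudges_eq_mirror (row : List Char) (c : Nat) :
    (smudges_at row (c : Int) ((c : Int) + 1) = 0) ↔ mirror_at row c = true := by
  rw [smudges_at_eq_zero_iff, mirror_at_iff]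

theorem rowsOk_eq_all (rows : List String) (c : Nat) :
    rowsOk rows c = rows.all (fun row => mirror_at row.toList c) := by
  induction rows with
  | nil => rfl
  | cons s rest ih =>
    simp only [rowsOk, List.all_cons, ih]
    by_cases h : smudges_at s.toList (c : Int) ((c : Int) + 1) = 0
    · have := (smudges_eq_mirror s.toList c).mp h
      simp [h, this]
    · have hmf : mirror_at s.toList c = false :=
        Bool.eq_false_iff.mpr (fun ht => h ((smudges_eq_mirror s.toList c).mpr ht))
      simp [h, hmf]

theorem foldl_filter_eq (rows : List String) (init : List Nat) :
    rows.foldl (fun valid row => valid.filter (fun c => mirror_at row.toList c)) init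
      = init.filter (fun c => rows.all (fun row => mirror_at row.toList c)) := by
  induction rows generalizing init with
  | nil => simp
  | cons s rest ih =>
    simp only [List.foldl_cons, ih, List.filter_filter, List.all_cons]
    congr 1
    funext x
    exact Bool.and_comm _ _

theorem foldl_shift (M : List Nat) (a b : Int) :
    M.foldl (fun (a : Int) (c : Nat) => a + ((c : Int) + 1)) (a + b)
      = a + M.foldl (fun (a : Int) (c : Nat) => a + ((c : Int) + 1)) b := by
  induction M generalizing a b with
  | nil => simp
  | cons x xs ihm =>
    simp only [List.foldl_cons]
    rw [add_assoc, ihm]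

theorem foldl_score_eq (L : List Nat) (p : Nat → Bool) (mult : Int) (init : Int) :
    L.foldl (fun (score : Int) (c : Nat) => if p c then score + ((c : Int) + 1) * mult else score) init
      = init + ((L.filter p).foldl (fun (a : Int) (c : Nat) => a + ((c : Int) + 1)) 0) * mult := by
  induction L generalizing init with
  | nil => simp
  | cons c rest ih =>
    simp only [List.foldl_cons, List.filter_cons]
    by_cases h : p c = true
    · rw [if_pos h, if_pos h, List.foldl_cons, ih,
          show ((0:Int) + ((c:Int)+1)) = ((c:Int)+1) + 0 from by ring,
          foldl_shift _ ((c : Int) + 1) 0]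
      ring
    · rw [if_neg h, if_neg h, ih]

-- ===== VERDICT (by name: the statement is the Claim_ definition above) =====
theorem score_from_chunk_spec : Claim_equal_score_from_chunk := by
  intro chunk score_multiplier _ _
  unfold Spec_score_from_chunk
  simp only [score_from_chunk, score_from_chunk_alt]
  rw [foldl_filter_eq]
  simp only [rowsOk_eq_all]
  rw [foldl_score_eq _ (fun c => chunk.all (fun row => mirror_at row.toList c)) score_multiplier 0]
  ring
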